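-- pv_equiv track=rewrite | github.com/Enjef/Algo | 1700 - 1799/1758 - Minimum Changes To Make Alternating Binary String/1758 - Minimum Changes To Make Alternating Binary String.py | minOperations_best_speed
-- ===== SOURCE A (Python) =====
-- def minOperations_best_speed(s: str) -> int:
--     if len(s) <= 1:
--         return 0
--     a, b = '0', '1'
--     c1, c2 = 0, 0
--     for c in s:
--         if c != a:
--             c1 += 1
--         if c != b:
--             c2 += 1
--         a, b = b, a
--     return min(c1, c2)
-- ===== SOURCE B (Python) =====
-- def minOperations_best_speed(s: str) -> int:
--     # Split the string into the characters at even and at odd indices, count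
--     # how many already agree with each of the two alternating patterns
--     # ("0101..." keeps even '0's and odd '1's; "1010..." the converse),
--     # and change everything that does not agree with the better pattern.
--     even, odd = s[::2], s[1:][::2]
--     keep = max(even.count('0') + odd.count('1'),
--                even.count('1') + odd.count('0'))
--     return len(s) - keep
-- ===== Notes on version B (the rewrite author's own statement) =====
-- stated objective: faster
-- what changed: Instead of A's stateful per-character loop with two swapped sentinel characters and two mismatch counters, B slices the string into its even-index and odd-index subsequences, counts with str.count how many characters already agree with each alternating pattern, and returns len(s) minus the larger agreement count.
-- outside the precondition, e.g. on minOperations_best_speed('x'): A returns 0, B returns 1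
import Mathlib
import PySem

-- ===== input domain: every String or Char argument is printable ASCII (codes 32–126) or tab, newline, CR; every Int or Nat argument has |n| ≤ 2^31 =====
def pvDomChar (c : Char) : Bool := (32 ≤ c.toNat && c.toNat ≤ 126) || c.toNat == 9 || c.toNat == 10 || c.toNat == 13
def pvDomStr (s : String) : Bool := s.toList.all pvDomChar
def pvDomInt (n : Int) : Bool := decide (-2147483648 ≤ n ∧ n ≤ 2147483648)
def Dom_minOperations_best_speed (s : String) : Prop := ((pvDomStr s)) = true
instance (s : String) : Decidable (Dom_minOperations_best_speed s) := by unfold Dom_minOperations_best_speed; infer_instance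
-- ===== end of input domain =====

-- B replaces A's stateful loop (two swapped sentinel chars, two mismatch counters) by slicing the
-- string into even- and odd-index subsequences, counting kept characters per pattern, and returning
-- len(s) - max(keep); same O(n) cost. Pre_ excludes one corner where both answers are defensible.


-- ===== PORT A =====
-- the for-loop: state (a, b, c1, c2), one step per character
def goA_minOps : List Char → Char → Char → Int → Int → Int × Int
  | [], _, _, c1, c2 => (c1, c2)
  | c :: rest, a, b, c1, c2 =>
      goA_minOps rest b a (if c ≠ a then c1 + 1 else c1) (if c ≠ b then c2 + 1 else c2)

def minOperations_best_speed (s : String) : Int :=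
  if PySem.Str.len s ≤ 1 then 0
  else
    let p := goA_minOps s.toList '0' '1' 0 0
    min p.1 p.2

-- ===== PORT B =====
-- s[::2] and (s[1:])[::2]; step 2 ≠ 0, so Python's slice always yields a value — '.getD ""' only
-- discharges the impossible 'none' of PySem.Str.slice? and never fires.
def minOperations_best_speed_alt (s : String) : Int :=
  let even := (PySem.Str.slice? s none none 2).getD ""
  let odd := (PySem.Str.slice? (PySem.Str.slice s (some 1) none) none none 2).getD ""
  let keep := max (PySem.Str.count even "0" + PySem.Str.count odd "1")
                  (PySem.Str.count even "1" + PySem.Str.count odd "0")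
  (s.length : Int) - (keep : Int)

-- ===== PRECONDITION & SPEC =====
-- Pre_ excludes single-character strings whose character is neither '0' nor '1': there A's length
-- guard answers 0 (a one-character string is trivially alternating) while B counts the non-binary
-- character as one needed change — an unspecified corner where both values are defensible.
def Pre_minOperations_best_speed (s : String) : Prop :=
  ¬ (s.length = 1 ∧ s ≠ "0" ∧ s ≠ "1")
instance (s : String) : Decidable (Pre_minOperations_best_speed s) := by unfold Pre_minOperations_best_speed; infer_instance

def pvWitness_minOperations_best_speed : String := "010010"

def Spec_minOperations_best_speed (s : String) (out : Int) : Prop := out = minOperations_best_speed_alt s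
instance (s : String) (out : Int) : Decidable (Spec_minOperations_best_speed s out) := by unfold Spec_minOperations_best_speed; infer_instance

-- ===== CLAIM (what is proved, stated in full; the proofs are below) =====
def Claim_equal_minOperations_best_speed : Prop := ∀ (s : String), Dom_minOperations_best_speed s → Pre_minOperations_best_speed s → Spec_minOperations_best_speed s (minOperations_best_speed s)

-- ===== LEMMAS AND PROOFS =====

-- the characters at even indices (what s[::2] selects)
def evensMO : List Char → List Char
  | [] => []
  | [a] => [a]
  | a :: _ :: t => a :: evensMO t

-- the characters at odd indices
def oddsMO (l : List Char) : List Char := evensMO l.tail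

theorem oddsMO_cons (c : Char) (rest : List Char) : oddsMO (c :: rest) = evensMO rest := rfl

theorem evensMO_cons (c : Char) (rest : List Char) :
    evensMO (c :: rest) = c :: oddsMO rest := by
  cases rest <;> simp [evensMO, oddsMO]

theorem count_go_singleton (c : Char) : ∀ (l : List Char) (fuel acc : Nat),
    l.length ≤ fuel → PySem.Chars.count.go [c] fuel l acc = acc + l.count c := by
  intro l
  induction l with
  | nil => intro fuel acc _; cases fuel <;> simp [PySem.Chars.count.go]
  | cons h t ih =>
      intro fuel acc hf
      cases fuel with
      | zero => simp at hf
      | succ f =>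
          have hf' : t.length ≤ f := by simpa using hf
          by_cases hc : c = h
          · subst hc
            simp only [PySem.Chars.count.go, List.isPrefixOf]
            simp [ih f (acc + 1) hf']
            omega
          · have hp : ([c].isPrefixOf (h :: t)) = false := by
              simp [List.isPrefixOf, hc]
            simp only [PySem.Chars.count.go]
            simp [hp, ih f acc hf', List.count_cons]
            exact fun hh => hc hh.symm

theorem chars_count_singleton (l : List Char) (c : Char) :
    PySem.Chars.count l [c] = l.count c := by
  simpa [PySem.Chars.count] using count_go_singleton c l l.length 0 le_rfl

theorem filterMap_range_evensMO : ∀ l : List Char,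
    (List.range ((l.length + 1) / 2)).filterMap (fun k => l[2 * k]?) = evensMO l := by
  intro l
  induction l using evensMO.induct with
  | case1 => simp [evensMO]
  | case2 a => simp [evensMO]
  | case3 a b t ih =>
      have hlen : ((a :: b :: t).length + 1) / 2 = (t.length + 1) / 2 + 1 := by
        simp; omega
      rw [hlen, List.range_succ_eq_map, List.filterMap_cons, List.filterMap_map]
      have hfun : ((fun k => (a :: b :: t)[2 * k]?) ∘ Nat.succ) = fun k => t[2 * k]? := by
        funext k
        have h2 : 2 * Nat.succ k = 2 * k + 1 + 1 := by omega
        simp [Function.comp, h2]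
      rw [hfun, ih]
      simp [evensMO]

theorem slice?_step_two (l : List Char) :
    PySem.List.slice? l none none 2 = some (evensMO l) := by
  simp only [PySem.List.slice?, PySem.List.sliceIndices]
  norm_num
  rcases Nat.eq_zero_or_pos l.length with h0 | hpos
  · have hl : l = [] := List.length_eq_zero_iff.mp h0
    subst hl; simp [evensMO]
  · rw [if_pos hpos,
      show (((l.length : Int) + 2 - 1) / 2).toNat = (l.length + 1) / 2 from by omega,
      show (fun (x : Nat) => l[(2 * (x : Int)).toNat]?) = fun k => l[2 * k]? from
        funext (fun k => by norm_num [show ((2 * (k : Int)).toNat) = 2 * k from by omega]),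
      filterMap_range_evensMO]

-- A's loop computes (len − keep₀, len − keep₁) where keepᵢ counts positions already matching pattern i
theorem goA_minOps_eq (l : List Char) : ∀ (a b : Char) (c1 c2 : Int),
    goA_minOps l a b c1 c2 =
      (c1 + l.length - (((evensMO l).count a : Int) + ((oddsMO l).count b : Int)),
       c2 + l.length - (((evensMO l).count b : Int) + ((oddsMO l).count a : Int))) := by
  induction l with
  | nil => intro a b c1 c2; simp [goA_minOps, evensMO, oddsMO]
  | cons c rest ih =>
      intro a b c1 c2
      simp only [goA_minOps, ih, evensMO_cons, oddsMO_cons, List.count_cons, List.length_cons]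
      rw [Prod.mk.injEq]
      constructor
      · by_cases h : c = a
        · subst h; simp; ring
        · simp [h]; ring
      · by_cases h : c = b
        · subst h; simp; ring
        · simp [h]; ring

-- B unfolded to counts over evensMO / oddsMO of s.toList
theorem alt_eq (s : String) :
    minOperations_best_speed_alt s =
      (s.length : Int) -
        ((max ((evensMO s.toList).count '0' + (oddsMO s.toList).count '1')
              ((evensMO s.toList).count '1' + (oddsMO s.toList).count '0') : Nat) : Int) := by
  unfold minOperations_best_speed_alt
  have h1 : PySem.Str.slice? s none none 2 = some (String.ofList (evensMO s.toList)) := by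
    simp [PySem.Str.slice?, PySem.Chars.slice?_eq_listSlice?, slice?_step_two]
  have htail : (PySem.Str.slice s (some 1) none).toList = s.toList.tail := by
    simp [PySem.Str.toList_slice, PySem.Chars.slice_eq_listSlice, PySem.List.slice_from_one]
  have h2 : PySem.Str.slice? (PySem.Str.slice s (some 1) none) none none 2
      = some (String.ofList (oddsMO s.toList)) := by
    simp [PySem.Str.slice?, PySem.Chars.slice?_eq_listSlice?, htail, slice?_step_two, oddsMO]
  rw [h1, h2]
  simp [PySem.Str.count_eq, chars_count_singleton]

-- ===== VERDICT (by name: the statement is the Claim_ definition above) =====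
theorem minOperations_best_speed_spec : Claim_equal_minOperations_best_speed := by
  intro s _ hpre
  unfold Spec_minOperations_best_speed
  rw [alt_eq]
  unfold minOperations_best_speed
  have hlen : s.toList.length = s.length := by simp
  by_cases h : s.length ≤ 1
  · have h' : PySem.Str.len s ≤ 1 := by simp [PySem.Str.len_eq]; omega
    rw [if_pos h']
    rcases Nat.le_one_iff_eq_zero_or_eq_one.mp h with hl | hl
    · have hnil : s.toList = [] := List.length_eq_zero_iff.mp (by omega)
      simp [hnil, hl, evensMO, oddsMO]
    · by_cases h0 : s = "0"
      · subst h0; decide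
      · by_cases h1 : s = "1"
        · subst h1; decide
        · exact absurd ⟨hl, h0, h1⟩ hpre
  · have h' : ¬ PySem.Str.len s ≤ 1 := by simp [PySem.Str.len_eq]; omega
    rw [if_neg h', goA_minOps_eq]
    simp only
    push_cast
    omega
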